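-- pv_equiv track=rewrite | github.com/Mariohnn/MarioStorage | PostgreSQL DB-filling+queries/File_to_DB (Python-PostgreSQL).py | prepara_catid
-- ===== SOURCE A (Python) =====
-- def prepara_catid(categoria):
--     characters = "|[abcdefghijklmnopqrstuvwxyzABCDEFGHIJKLMNOPQRSüäöçTUVWXáóYёZé&ёí-/}{:ñ@ẽ#!?$%^*)+(.' "
--     for x in range(len(characters)):
--         categoria = categoria.replace(characters[x],"")
--     categoria = categoria.replace("]",",")
--     categoria = categoria.split(",")
--     categoria = categoria[:-1]
--     return categoria
-- ===== SOURCE B (Python) =====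
-- _DELETE = frozenset("|[abcdefghijklmnopqrstuvwxyzABCDEFGHIJKLMNOPQRSüäöçTUVWXáóYёZé&ёí-/}{:ñ@ẽ#!?$%^*)+(.' ")
--
--
-- def prepara_catid(categoria):
--     # single-pass state machine: accumulate the current id, emit it on each
--     # terminator (']' or ','); the trailing unterminated piece is never emitted,
--     # so no split / no dropping of the last element is needed.
--     ids = []
--     cur = []
--     for ch in categoria:
--         if ch in _DELETE:
--             continue
--         if ch == ']' or ch == ',':
--             ids.append(''.join(cur))
--             cur = []
--         else:
--             cur.append(ch)
--     return ids
-- ===== Notes on version B (the rewrite author's own statement) =====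
-- stated objective: alternative
-- what changed: A makes ~90 whole-string replace passes, then a bracket-to-comma replace, a split and a drop of the last piece; B is a single character-by-character state machine with an accumulator that skips stripped characters and emits the current id on each terminator (']' or ','), never materialising an intermediate string and never splitting, so the trailing unterminated piece simply is never emitted.
import Mathlib
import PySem

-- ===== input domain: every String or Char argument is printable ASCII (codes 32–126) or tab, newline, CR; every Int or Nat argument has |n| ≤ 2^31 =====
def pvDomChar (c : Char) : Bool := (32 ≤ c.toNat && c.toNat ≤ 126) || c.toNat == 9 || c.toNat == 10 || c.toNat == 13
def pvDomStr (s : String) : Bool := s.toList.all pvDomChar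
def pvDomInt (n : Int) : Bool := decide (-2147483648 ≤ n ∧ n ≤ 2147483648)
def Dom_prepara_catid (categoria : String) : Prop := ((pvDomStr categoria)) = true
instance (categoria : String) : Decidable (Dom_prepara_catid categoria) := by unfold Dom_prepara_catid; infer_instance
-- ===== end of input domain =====

-- B replaces A's staged passes (many replaces, then split, then drop-last) by ONE char-by-char
-- state machine that emits each id as its terminator is seen (the trailing piece is never emitted).

-- the literal `characters` constant A strips (B's frozenset holds the same characters)
def pvCharacters : String := "|[abcdefghijklmnopqrstuvwxyzABCDEFGHIJKLMNOPQRSüäöçTUVWXáóYёZé&ёí-/}{:ñ@ẽ#!?$%^*)+(.' "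

-- ===== PORT A =====
-- for x in range(len(characters)): categoria = categoria.replace(characters[x], "")
-- then .replace("]", ","), .split(",") (sep ≠ "", so split? is `some`), and [:-1]
def prepara_catid (categoria : String) : List String :=
  PySem.List.slice
    ((PySem.Str.split?
        (PySem.Str.replace
          (pvCharacters.toList.foldl
            (fun acc c => PySem.Str.replace acc (String.ofList [c]) "") categoria)
          "]" ",")
        ",").getD [])
    none (some (-1))

-- ===== PORT B =====
-- one fold over the characters with state (ids so far, current id being built):
-- skip a stripped char; on ']' or ',' emit ''.join(cur) and reset; otherwise append the char
def pvStep (st : List String × List Char) (ch : Char) : List String × List Char :=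
  if pvCharacters.toList.contains ch then st
  else if ch = ']' ∨ ch = ',' then (st.1 ++ [String.ofList st.2], [])
  else (st.1, st.2 ++ [ch])

def prepara_catid_alt (categoria : String) : List String :=
  (categoria.toList.foldl pvStep ([], [])).1

-- ===== PRECONDITION & SPEC =====
def Spec_prepara_catid (categoria : String) (out : List String) : Prop := out = prepara_catid_alt categoria
instance (categoria : String) (out : List String) : Decidable (Spec_prepara_catid categoria out) := by unfold Spec_prepara_catid; infer_instance

-- ===== CLAIM (what is proved, stated in full; the proofs are below) =====
def Claim_equal_prepara_catid : Prop := ∀ (categoria : String), Dom_prepara_catid categoria → Spec_prepara_catid categoria (prepara_catid categoria)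

-- ===== LEMMAS AND PROOFS =====

-- how A translates one character: stripped ↦ nothing, ']' ↦ ',', else itself
def pvTr (c : Char) : List Char :=
  if pvCharacters.toList.contains c then []
  else if c = ']' then [','] else [c]

-- reference comma-splitter used to bridge PySem.Chars.splitOn and B's fold
def pvTokens (pre : List Char) : List Char → List (List Char)
  | [] => [pre]
  | c :: t => if c = ',' then pre :: pvTokens [] t else pvTokens (pre ++ [c]) t

theorem pvTokens_ne_nil (pre : List Char) (l : List Char) : pvTokens pre l ≠ [] := by
  induction l generalizing pre with
  | nil => simp [pvTokens]
  | cons c t ih => by_cases h : c = ',' <;> simp [pvTokens, h, ih]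

-- replace.go with a single-character pattern is a flatMap
theorem pv_replace_go_single (c : Char) (new : List Char) :
    ∀ (l : List Char) (fuel : Nat) (acc : List Char), l.length ≤ fuel →
    PySem.Chars.replace.go [c] new fuel l acc
      = acc.reverse ++ l.flatMap (fun x => if x = c then new else [x]) := by
  intro l
  induction l with
  | nil =>
    intro fuel acc _
    cases fuel <;> simp [PySem.Chars.replace.go]
  | cons d t ih =>
    intro fuel acc h
    cases fuel with
    | zero => simp at h
    | succ n =>
      rw [List.length_cons] at h
      simp only [PySem.Chars.replace.go, List.isPrefixOf]
      by_cases hdc : c = d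
      · subst hdc
        simp only [BEq.rfl, Bool.true_and, if_pos]
        rw [show List.drop [c].length (c :: t) = t from rfl,
            ih n (new.reverse ++ acc) (by omega)]
        simp
      · have hb : (c == d) = false := by simp [hdc]
        simp only [hb, Bool.false_and, Bool.false_eq_true, if_false]
        rw [ih n (d :: acc) (by omega)]
        simp [Ne.symm hdc]

theorem pv_replace_single (c : Char) (new l : List Char) :
    PySem.Chars.replace l [c] new
      = l.flatMap (fun x => if x = c then new else [x]) := by
  rw [PySem.Chars.replace]
  rw [if_neg (by simp)]
  simpa using pv_replace_go_single c new l l.length [] le_rfl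

-- a single-char delete-replace is a filter
theorem pv_replace_delete (c : Char) (l : List Char) :
    PySem.Chars.replace l [c] [] = l.filter (fun x => !(x == c)) := by
  rw [pv_replace_single]
  induction l with
  | nil => rfl
  | cons d t ih =>
    by_cases h : d = c
    · simp [h, ih]
    · have hb : (d == c) = false := by simp [h]
      simp [h, hb, ih]

-- A's replace loop deletes exactly the characters of cs: it is one filter
theorem pv_fold_replace (cs : List Char) :
    ∀ (s : String),
    (cs.foldl (fun acc c => PySem.Str.replace acc (String.ofList [c]) "") s).toList
      = s.toList.filter (fun x => !(cs.contains x)) := by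
  induction cs with
  | nil => intro s; simp
  | cons c cs ih =>
    intro s
    rw [List.foldl_cons, ih]
    have h1 : (PySem.Str.replace s (String.ofList [c]) "").toList
        = s.toList.filter (fun x => !(x == c)) := by
      rw [PySem.Str.toList_replace, String.toList_ofList]
      simpa using pv_replace_delete c s.toList
    rw [h1, List.filter_filter]
    apply List.filter_congr
    intro x _
    by_cases hx : x = c <;> simp [hx]

-- filter-then-flatMap fuses into one flatMap
theorem pv_filter_flatMap (p : Char → Bool) (f : Char → List Char) (l : List Char) :
    (l.filter p).flatMap f = l.flatMap (fun x => if p x then f x else []) := by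
  induction l with
  | nil => rfl
  | cons d t ih =>
    by_cases h : p d = true
    · simp [h, ih]
    · simp only [Bool.not_eq_true] at h
      simp [h, ih]

-- the string A has built just before split equals the flatMap of pvTr
theorem pv_toList_eq (categoria : String) :
    (PySem.Str.replace
        (pvCharacters.toList.foldl
          (fun acc c => PySem.Str.replace acc (String.ofList [c]) "") categoria)
        "]" ",").toList
      = categoria.toList.flatMap pvTr := by
  rw [PySem.Str.toList_replace]
  rw [show ("]" : String).toList = [']'] from rfl,
      show ("," : String).toList = [','] from rfl]
  rw [pv_replace_single, pv_fold_replace, pv_filter_flatMap]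
  apply List.flatMap_congr
  intro x _
  simp only [pvTr]
  by_cases hc : x ∈ pvCharacters.toList
  · simp [hc]
  · by_cases hb : x = ']'
    · have hnb : ']' ∉ pvCharacters.toList := by decide
      simp [hb, hnb]
    · simp [hc, hb]

-- splitOn.go with the single-char separator ',' computes pvTokens
theorem pv_splitOn_go (fuel : Nat) :
    ∀ (l : List Char) (cur : List Char) (acc : List (List Char)), l.length < fuel →
    PySem.Chars.splitOn.go [','] fuel l cur acc
      = acc.reverse ++ pvTokens cur.reverse l := by
  induction fuel with
  | zero => intro l cur acc h; omega
  | succ n ih =>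
    intro l cur acc h
    cases l with
    | nil => simp [PySem.Chars.splitOn.go, pvTokens]
    | cons c t =>
      rw [List.length_cons] at h
      simp only [PySem.Chars.splitOn.go, List.isPrefixOf]
      by_cases hc : c = ','
      · subst hc
        simp only [BEq.rfl, Bool.true_and, if_pos]
        rw [show List.drop [','].length (',' :: t) = t from rfl,
            ih t [] (cur.reverse :: acc) (by omega)]
        simp [pvTokens]
      · have hb : ((',' : Char) == c) = false := by simp [Ne.symm hc]
        simp only [hb, Bool.false_and, Bool.false_eq_true, if_false]
        rw [ih t (c :: cur) acc (by omega)]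
        simp [pvTokens, hc]

theorem pv_splitOn_eq (l : List Char) :
    PySem.Chars.splitOn l [','] = pvTokens [] l := by
  rw [PySem.Chars.splitOn]
  simpa using pv_splitOn_go (l.length + 1) l [] [] (by omega)

-- evaluation lemmas for pvStep and pvTr on the three kinds of characters
theorem pvStep_del (st : List String × List Char) (c : Char)
    (h : c ∈ pvCharacters.toList) : pvStep st c = st := by
  simp [pvStep, h]

theorem pvStep_term (st : List String × List Char) (c : Char)
    (h : c ∉ pvCharacters.toList) (ht : c = ']' ∨ c = ',') :
    pvStep st c = (st.1 ++ [String.ofList st.2], []) := by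
  simp [pvStep, h, ht]

theorem pvStep_other (st : List String × List Char) (c : Char)
    (h : c ∉ pvCharacters.toList) (ht : ¬(c = ']' ∨ c = ',')) :
    pvStep st c = (st.1, st.2 ++ [c]) := by
  simp only [pvStep]
  rw [if_neg (by simpa using h), if_neg ht]

theorem pvTr_del (c : Char) (h : c ∈ pvCharacters.toList) : pvTr c = [] := by
  simp [pvTr, h]

theorem pvTr_term (c : Char) (h : c ∉ pvCharacters.toList) (ht : c = ']' ∨ c = ',') :
    pvTr c = [','] := by
  rcases ht with h1 | h1 <;> subst h1
  · have hm : (']' : Char) ∉ pvCharacters.toList := by decide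
    simp [pvTr, hm]
  · have hm : (',' : Char) ∉ pvCharacters.toList := by decide
    have hne : (',' : Char) ≠ ']' := by decide
    simp [pvTr, hm, hne]

theorem pvTr_other (c : Char) (h : c ∉ pvCharacters.toList) (ht : ¬(c = ']' ∨ c = ',')) :
    pvTr c = [c] := by
  push Not at ht
  simp [pvTr, h, ht.1]

-- B's fold emits exactly the comma-terminated tokens of the translated stream
theorem pv_fold_tokens :
    ∀ (l : List Char) (out : List String) (cur : List Char),
    (l.foldl pvStep (out, cur)).1
      = out ++ ((pvTokens cur (l.flatMap pvTr)).dropLast).map String.ofList := by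
  intro l
  induction l with
  | nil => intro out cur; simp [pvTokens]
  | cons c t ih =>
    intro out cur
    rw [List.foldl_cons, List.flatMap_cons]
    by_cases hdel : c ∈ pvCharacters.toList
    · rw [pvStep_del _ _ hdel, pvTr_del _ hdel, List.nil_append, ih out cur]
    · by_cases hterm : c = ']' ∨ c = ','
      · rw [pvStep_term _ _ hdel hterm, pvTr_term _ hdel hterm]
        rw [show ([','] ++ t.flatMap pvTr) = ',' :: t.flatMap pvTr from rfl]
        rw [ih (out ++ [String.ofList cur]) []]
        rw [show pvTokens cur (',' :: t.flatMap pvTr)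
              = cur :: pvTokens [] (t.flatMap pvTr) from by simp [pvTokens]]
        rw [List.dropLast_cons_of_ne_nil (pvTokens_ne_nil [] _)]
        simp
      · rw [pvStep_other _ _ hdel hterm, pvTr_other _ hdel hterm]
        rw [show ([c] ++ t.flatMap pvTr) = c :: t.flatMap pvTr from rfl]
        rw [ih out (cur ++ [c])]
        have hne : c ≠ ',' := fun h => hterm (Or.inr h)
        rw [show pvTokens cur (c :: t.flatMap pvTr)
              = pvTokens (cur ++ [c]) (t.flatMap pvTr) from by simp [pvTokens, hne]]

-- ===== VERDICT (by name: the statement is the Claim_ definition above) =====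
theorem prepara_catid_spec : Claim_equal_prepara_catid := by
  intro categoria _
  unfold Spec_prepara_catid prepara_catid prepara_catid_alt
  set s2 := PySem.Str.replace
      (pvCharacters.toList.foldl
        (fun acc c => PySem.Str.replace acc (String.ofList [c]) "") categoria)
      "]" "," with hs2
  have hsplit : PySem.Str.split? s2 ","
      = some ((PySem.Chars.splitOn s2.toList [',']).map String.ofList) := by
    have h := PySem.Str.split?_map s2 ","
    rw [show ("," : String).toList = [','] from rfl] at h
    rw [show PySem.Chars.split? s2.toList [','] = some (PySem.Chars.splitOn s2.toList [','])
        from by simp [PySem.Chars.split?]] at h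
    obtain ⟨ps, hps, hmap⟩ := Option.map_eq_some_iff.mp h
    have hps2 : ps = (PySem.Chars.splitOn s2.toList [',']).map String.ofList := by
      rw [← hmap, List.map_map]
      simp [Function.comp_def]
    rw [hps, hps2]
  rw [hsplit, Option.getD_some, pv_toList_eq, pv_splitOn_eq]
  rw [show (PySem.List.slice ((pvTokens [] (categoria.toList.flatMap pvTr)).map String.ofList)
        none (some (-1)))
      = ((pvTokens [] (categoria.toList.flatMap pvTr)).map String.ofList).dropLast from by
    simp [pysem]]
  rw [pv_fold_tokens categoria.toList [] []]
  simp [List.map_dropLast]
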